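-- pv_equiv track=rewrite | github.com/Alonevs/FantasyWorld_ScreamingArch | src/Infrastructure/DjangoFramework/persistence/utils.py | find_cover_image
-- ===== SOURCE A (Python) =====
-- from typing import List, Dict, Optional, Any
--
-- def find_cover_image(cover_filename: Optional[str], all_imgs: List[Dict[str, Any]]) -> Optional[Dict[str, Any]]:
--     """
--     Encuentra una imagen de portada usando matching case-insensitive y flexible.
--
--     Esta función centraliza la lógica de búsqueda de portadas que antes estaba
--     duplicada en múltiples archivos (world_views, review_views, team.py).
--
--     Estrategia de búsqueda:
--     1. Coincidencia exacta (case-insensitive)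
--     2. Coincidencia sin extensión (case-insensitive) - para casos donde
--        metadata tiene "Image" pero archivo es "Image.webp"
--
--     Args:
--         cover_filename (str): Nombre del archivo de portada a buscar
--         all_imgs (list): Lista de diccionarios con información de imágenes.
--                         Cada dict debe tener al menos: {'filename': str, 'url': str}
--
--     Returns:
--         dict: Imagen encontrada con estructura {'filename': str, 'url': str, ...}
--         None: Si no se encuentra ninguna coincidencia
--
--     Examples:
--         >>> imgs = [{'filename': 'Cover.webp', 'url': '01/Cover.webp'}]
--         >>> find_cover_image('COVER.WEBP', imgs)
--         {'filename': 'Cover.webp', 'url': '01/Cover.webp'}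
--
--         >>> find_cover_image('Cover', imgs)  # Sin extensión
--         {'filename': 'Cover.webp', 'url': '01/Cover.webp'}
--
--         >>> find_cover_image('NotFound.jpg', imgs)
--         None
--
--     Note:
--         Esta función es case-insensitive para manejar casos donde metadata
--         almacena nombres en mayúsculas (ej: "ABISMOS_PRIME_V1.WEBP") pero
--         el archivo real está en formato mixto (ej: "Abismos_Prime_v1.webp").
--     """
--     if not cover_filename or not all_imgs:
--         return None
--
--     cover_lower = cover_filename.lower()
--
--     # 1. Exact match (case-insensitive)
--     match = next((i for i in all_imgs if i['filename'].lower() == cover_lower), None)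
--
--     # 2. Fallback: without extension (case-insensitive)
--     if not match:
--         c_clean = cover_filename.rsplit('.', 1)[0].lower()
--         match = next((i for i in all_imgs if i['filename'].rsplit('.', 1)[0].lower() == c_clean), None)
--
--     return match
-- ===== SOURCE B (Python) =====
-- def find_cover_image(cover_filename, all_imgs):
--     # Single pass: track first exact match (break early) and first stripped match.
--     if not cover_filename or not all_imgs:
--         return None
--     cover_lower = cover_filename.lower()
--     c_clean = cover_filename.rsplit('.', 1)[0].lower()
--     strip_match = None
--     for i in all_imgs:
--         f = i['filename']
--         if f.lower() == cover_lower: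
--             return i
--         if strip_match is None and f.rsplit('.', 1)[0].lower() == c_clean:
--             strip_match = i
--     return strip_match
-- ===== Notes on version B (the rewrite author's own statement) =====
-- stated objective: alternative
-- what changed: Replaces A's two full generator scans (exact pass, then extension-stripped pass) by a single loop that carries both the early-returning exact match and the first extension-stripped candidate.
-- outside the precondition, e.g. on find_cover_image('a', [{'filename': 'a'}, {}]): A returns {'filename': 'a'}, B returns {'filename': 'a'}
import Mathlib
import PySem

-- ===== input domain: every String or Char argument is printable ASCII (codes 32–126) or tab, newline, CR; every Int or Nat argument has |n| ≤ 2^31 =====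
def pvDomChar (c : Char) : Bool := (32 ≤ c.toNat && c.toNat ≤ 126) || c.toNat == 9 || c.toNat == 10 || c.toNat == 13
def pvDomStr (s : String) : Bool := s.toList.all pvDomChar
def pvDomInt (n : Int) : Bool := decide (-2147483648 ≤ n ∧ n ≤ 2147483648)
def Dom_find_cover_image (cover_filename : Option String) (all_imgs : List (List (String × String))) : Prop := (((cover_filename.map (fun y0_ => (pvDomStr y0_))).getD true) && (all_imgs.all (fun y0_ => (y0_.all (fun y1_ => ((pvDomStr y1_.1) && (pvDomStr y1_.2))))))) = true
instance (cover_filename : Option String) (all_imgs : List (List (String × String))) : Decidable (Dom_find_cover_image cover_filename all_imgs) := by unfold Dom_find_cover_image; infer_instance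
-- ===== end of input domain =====

-- ===== PORT A =====
-- B is a single pass keeping both candidates instead of A's two scans of the list (objective: alternative decomposition).
-- i['filename'] raises KeyError on a dict without that key; Pre_ excludes such inputs, the port uses getD "".
def pvFilename (i : List (String × String)) : String := ((PySem.Dict.mk i).get? "filename").getD ""

-- s.rsplit('.', 1)[0]: everything before the LAST '.', the whole string if there is none (exact hand port).
def pvStripExt (s : String) : String :=
  let cs := s.toList
  if '.' ∈ cs then String.ofList (cs.take ((PySem.Chars.rfind cs ['.']).toNat)) else s

def find_cover_image (cover_filename : Option String) (all_imgs : List (List (String × String))) : Option (List (String × String)) :=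
  match cover_filename with
  | none => none
  | some c =>
    if c = "" ∨ all_imgs = [] then none
    else
      let cover_lower := PySem.Str.lower c
      match all_imgs.find? (fun i => PySem.Str.lower (pvFilename i) == cover_lower) with
      | some m => some m
      | none =>
        let c_clean := PySem.Str.lower (pvStripExt c)
        all_imgs.find? (fun i => PySem.Str.lower (pvStripExt (pvFilename i)) == c_clean)

-- ===== PORT B =====
def pvLoop (cl cc : String) (strip : Option (List (String × String))) :
    List (List (String × String)) → Option (List (String × String))
  | [] => strip
  | i :: rest =>
    let f := pvFilename i
    if PySem.Str.lower f == cl then some i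
    else pvLoop cl cc
      (if strip.isNone && (PySem.Str.lower (pvStripExt f) == cc) then some i else strip) rest

def find_cover_image_alt (cover_filename : Option String) (all_imgs : List (List (String × String))) : Option (List (String × String)) :=
  match cover_filename with
  | none => none
  | some c =>
    if c = "" ∨ all_imgs = [] then none
    else pvLoop (PySem.Str.lower c) (PySem.Str.lower (pvStripExt c)) none all_imgs

-- ===== PRECONDITION & SPEC =====
-- Pre_ excludes inputs where some image dict lacks the key 'filename' (A raises KeyError there,
-- except when an exact match occurs strictly earlier, in which case A and B both still return it).
def Pre_find_cover_image (cover_filename : Option String) (all_imgs : List (List (String × String))) : Prop :=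
  cover_filename = none ∨ cover_filename = some "" ∨ all_imgs = [] ∨
  ∀ i ∈ all_imgs, ((PySem.Dict.mk i).get? "filename").isSome = true
instance (cover_filename : Option String) (all_imgs : List (List (String × String))) : Decidable (Pre_find_cover_image cover_filename all_imgs) := by unfold Pre_find_cover_image; infer_instance

def pvWitness_find_cover_image : Option String × (List (List (String × String))) :=
  (some "COVER", [[("filename", "Cover.webp"), ("url", "01/Cover.webp")]])

def Spec_find_cover_image (cover_filename : Option String) (all_imgs : List (List (String × String))) (out : Option (List (String × String))) : Prop := out = find_cover_image_alt cover_filename all_imgs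
instance (cover_filename : Option String) (all_imgs : List (List (String × String))) (out : Option (List (String × String))) : Decidable (Spec_find_cover_image cover_filename all_imgs out) := by unfold Spec_find_cover_image; infer_instance

-- ===== CLAIM (what is proved, stated in full; the proofs are below) =====
def Claim_equal_find_cover_image : Prop := ∀ (cover_filename : Option String) (all_imgs : List (List (String × String))), Dom_find_cover_image cover_filename all_imgs → Pre_find_cover_image cover_filename all_imgs → Spec_find_cover_image cover_filename all_imgs (find_cover_image cover_filename all_imgs)

-- ===== LEMMAS AND PROOFS =====
-- The one-pass loop equals: first exact match, else the carried strip candidate, else the first strip match.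
theorem pvLoop_eq (cl cc : String) (l : List (List (String × String)))
    (strip : Option (List (String × String))) :
    pvLoop cl cc strip l =
      match l.find? (fun i => PySem.Str.lower (pvFilename i) == cl) with
      | some m => some m
      | none =>
        match strip with
        | some s => some s
        | none => l.find? (fun i => PySem.Str.lower (pvStripExt (pvFilename i)) == cc) := by
  induction l generalizing strip with
  | nil => cases strip <;> simp [pvLoop]
  | cons i rest ih =>
    by_cases h : PySem.Str.lower (pvFilename i) == cl
    · simp [pvLoop, List.find?, h]
    · simp only [pvLoop, List.find?, h, Bool.false_eq_true, if_false]
      rw [ih]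
      cases hf : rest.find? (fun i => PySem.Str.lower (pvFilename i) == cl) with
      | some m => simp
      | none =>
        cases strip with
        | some s => simp
        | none =>
          by_cases hs : PySem.Str.lower (pvStripExt (pvFilename i)) == cc <;>
            simp [hs]

-- ===== VERDICT (by name: the statement is the Claim_ definition above) =====
theorem find_cover_image_spec : Claim_equal_find_cover_image := by
  intro cover_filename all_imgs _ _
  unfold Spec_find_cover_image find_cover_image find_cover_image_alt
  cases cover_filename with
  | none => rfl
  | some c =>
    by_cases h : c = "" ∨ all_imgs = []
    · simp [h]
    · simp only [h, if_false]
      rw [pvLoop_eq]
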